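-- pv_equiv track=rewrite | github.com/bhushanasati25/TUF-DSA-Course | Python/Practice Problems.py | even_binary_ones
-- ===== SOURCE A (Python) =====
-- def even_binary_ones(n):
--     res = []
--     for i in range(1, n + 1):
--         binary = bin(i)[2:]       # convert to binary string
--         ones = binary.count('1')  # count 1s
--         if ones % 2 == 0:
--             res.append(i)
--     return res
-- ===== SOURCE B (Python) =====
-- def even_binary_ones(n):
--     # Thue-Morse parity recurrence: parity(i) = parity(i >> 1) XOR (i & 1),
--     # computed in one O(n) pass over a growing table (no bin()/count per number).
--     par = [0]
--     res = []
--     for i in range(1, n + 1):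
--         p = par[i >> 1] ^ (i & 1)
--         par.append(p)
--         if p == 0:
--             res.append(i)
--     return res
-- ===== Notes on version B (the rewrite author's own statement) =====
-- stated objective: faster
-- what changed: Replaces per-number binary-string construction and digit counting with the Thue-Morse parity recurrence parity(i) = parity(i >> 1) XOR (i & 1), filled in one pass over a growing table.
import Mathlib
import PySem

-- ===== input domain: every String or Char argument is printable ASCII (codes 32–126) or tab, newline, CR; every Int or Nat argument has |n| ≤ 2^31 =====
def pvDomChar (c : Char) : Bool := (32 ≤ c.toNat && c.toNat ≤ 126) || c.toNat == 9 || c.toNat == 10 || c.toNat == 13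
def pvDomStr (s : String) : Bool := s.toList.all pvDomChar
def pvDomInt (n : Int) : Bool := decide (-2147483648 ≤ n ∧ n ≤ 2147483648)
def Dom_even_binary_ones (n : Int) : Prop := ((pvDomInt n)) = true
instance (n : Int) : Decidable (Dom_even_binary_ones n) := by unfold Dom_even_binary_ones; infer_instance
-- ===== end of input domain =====

-- B replaces per-number binary-string building and digit counting by the Thue-Morse
-- parity recurrence parity(i) = parity(i >> 1) XOR (i & 1), filled in one pass (objective: faster).

-- ===== PORT A =====
-- exact transliteration of Python's bin(i)[2:] for i ≥ 1 (the only values the loop uses)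
def pyBinAux (i : Nat) : List Char :=
  if _h : i = 0 then [] else pyBinAux (i / 2) ++ [if i % 2 = 1 then '1' else '0']
decreasing_by exact Nat.div_lt_self (Nat.pos_of_ne_zero _h) (by norm_num)

def even_binary_ones (n : Int) : List Int :=
  (PySem.List.pyRange 1 (n + 1) 1).foldl (fun res i =>
    let binary := pyBinAux i.toNat
    let ones := binary.count '1'
    if ones % 2 == 0 then res ++ [i] else res) []

-- ===== PORT B =====
def even_binary_ones_alt (n : Int) : List Int :=
  let st := (PySem.List.pyRange 1 (n + 1) 1).foldl (fun (st : List Nat × List Int) i =>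
    let p := (st.1.getD (i.toNat >>> 1) 0) ^^^ (i.toNat % 2)
    (st.1 ++ [p], if p == 0 then st.2 ++ [i] else st.2)) ([0], [])
  st.2

-- ===== PRECONDITION & SPEC =====
def Spec_even_binary_ones (n : Int) (out : List Int) : Prop := out = even_binary_ones_alt n
instance (n : Int) (out : List Int) : Decidable (Spec_even_binary_ones n out) := by unfold Spec_even_binary_ones; infer_instance

-- ===== CLAIM (what is proved, stated in full; the proofs are below) =====
def Claim_equal_even_binary_ones : Prop := ∀ (n : Int), Dom_even_binary_ones n → Spec_even_binary_ones n (even_binary_ones n)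

-- ===== LEMMAS AND PROOFS =====

-- popcount parity of i, as A computes it
def pvP (i : Nat) : Nat := (pyBinAux i).count '1' % 2

theorem pvP_zero : pvP 0 = 0 := by
  unfold pvP; rw [pyBinAux]; simp

theorem pvCount_rec (i : Nat) (h : i ≠ 0) :
    (pyBinAux i).count '1' = (pyBinAux (i / 2)).count '1' + i % 2 := by
  rw [pyBinAux]
  simp only [h, dite_false]
  rcases Nat.mod_two_eq_zero_or_one i with h2 | h2 <;> simp [h2, List.count_append]

theorem pvP_rec (i : Nat) (h : i ≠ 0) : pvP i = pvP (i / 2) ^^^ (i % 2) := by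
  unfold pvP
  rw [pvCount_rec i h, Nat.add_mod]
  rcases Nat.mod_two_eq_zero_or_one ((pyBinAux (i / 2)).count '1') with h1 | h1 <;>
    rcases Nat.mod_two_eq_zero_or_one i with h2 | h2 <;>
      simp [h1, h2]

-- joint loop invariant: after processing 1..k, B's table is the parities of 0..k and
-- B's result list equals A's result list
theorem pvLoop (k : Nat) :
    (PySem.List.pyRange 1 ((k : Int) + 1) 1).foldl (fun (st : List Nat × List Int) i =>
        let p := (st.1.getD (i.toNat >>> 1) 0) ^^^ (i.toNat % 2)
        (st.1 ++ [p], if p == 0 then st.2 ++ [i] else st.2)) ([0], []) =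
      ((List.range (k + 1)).map pvP,
        (PySem.List.pyRange 1 ((k : Int) + 1) 1).foldl (fun res i =>
          let binary := pyBinAux i.toNat
          let ones := binary.count '1'
          if ones % 2 == 0 then res ++ [i] else res) []) := by
  induction k with
  | zero =>
    rw [PySem.List.pyRange_one_eq_nil (by norm_num)]
    simp [List.range_succ, pvP_zero]
  | succ k ih =>
    have hsplit : PySem.List.pyRange 1 (((k + 1 : Nat) : Int) + 1) 1
        = PySem.List.pyRange 1 ((k : Int) + 1) 1 ++ [(k : Int) + 1] := by
      have hc : (((k + 1 : Nat) : Int) + 1) = ((k : Int) + 1) + 1 := by omega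
      rw [hc]
      exact PySem.List.pyRange_one_succ_right (a := 1) (b := (k : Int) + 1) (by omega)
    rw [hsplit, List.foldl_append, List.foldl_append, ih]
    simp only [List.foldl_cons, List.foldl_nil]
    have htn : ((k : Int) + 1).toNat = k + 1 := by omega
    have hsh : (k + 1) >>> 1 = (k + 1) / 2 := Nat.shiftRight_one _
    have hgd : ((List.range (k + 1)).map pvP).getD ((k + 1) / 2) 0 = pvP ((k + 1) / 2) := by
      rw [List.getD_eq_getElem?_getD]
      have hlt : (k + 1) / 2 < k + 1 := Nat.div_lt_self (by omega) (by norm_num)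
      simp [hlt]
    have hp : ((List.range (k + 1)).map pvP).getD ((k + 1) >>> 1) 0 ^^^ ((k + 1) % 2)
        = pvP (k + 1) := by
      rw [hsh, hgd, ← pvP_rec (k + 1) (by omega)]
    simp only [htn, hp]
    rw [Prod.mk.injEq]
    refine ⟨by simp [List.range_succ], ?_⟩
    rfl

-- ===== VERDICT (by name: the statement is the Claim_ definition above) =====
theorem even_binary_ones_spec : Claim_equal_even_binary_ones := by
  intro n _
  unfold Spec_even_binary_ones even_binary_ones even_binary_ones_alt
  by_cases hn : n ≤ 0
  · rw [PySem.List.pyRange_one_eq_nil (by omega)]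
    rfl
  · have hk : ((n.toNat : Int)) = n := Int.toNat_of_nonneg (by omega)
    rw [← hk, pvLoop n.toNat]
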